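-- pv_equiv track=rewrite | github.com/MrBrantCode/unitest_baseline | mut_generate/mist_train_cf/cf_90145/solution.py | get_nicknames
-- ===== SOURCE A (Python) =====
-- def get_nicknames(characters):
--     nicknames = set()
--
--     for character in characters:
--         # Convert character's nickname to lowercase
--         nickname = character.lower()
--
--         # Capitalize the first letter
--         nickname = nickname.capitalize()
--
--         # Replace special characters with ASCII codes
--         nickname = ''.join(str(ord(char)) if not char.isalnum() else char for char in nickname)
--
--         # Add the nickname to the set
--         nicknames.add(nickname)
--
--     # Sort the nicknames alphabetically and convert back to a list
--     return sorted(nicknames)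
-- ===== SOURCE B (Python) =====
-- def get_nicknames(characters):
--     # Online sorted insertion: maintain the result as a sorted, duplicate-free
--     # list from the start; each transformed nickname is inserted at its ordered
--     # position (or skipped if already present). No set, no final sort.
--     result = []
--     for character in characters:
--         nickname = ''.join(str(ord(c)) if not c.isalnum() else c
--                            for c in character.lower().capitalize())
--         i = 0
--         while i < len(result) and result[i] < nickname:
--             i += 1
--         if i == len(result) or result[i] != nickname:
--             result.insert(i, nickname)
--     return result
-- ===== Notes on version B (the rewrite author's own statement) =====
-- stated objective: alternative
-- what changed: B maintains the answer as a sorted duplicate-free list throughout: each transformed nickname is inserted online at its ordered position (or skipped if already there), replacing A's hash-set accumulation followed by a library sort.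
import Mathlib
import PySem

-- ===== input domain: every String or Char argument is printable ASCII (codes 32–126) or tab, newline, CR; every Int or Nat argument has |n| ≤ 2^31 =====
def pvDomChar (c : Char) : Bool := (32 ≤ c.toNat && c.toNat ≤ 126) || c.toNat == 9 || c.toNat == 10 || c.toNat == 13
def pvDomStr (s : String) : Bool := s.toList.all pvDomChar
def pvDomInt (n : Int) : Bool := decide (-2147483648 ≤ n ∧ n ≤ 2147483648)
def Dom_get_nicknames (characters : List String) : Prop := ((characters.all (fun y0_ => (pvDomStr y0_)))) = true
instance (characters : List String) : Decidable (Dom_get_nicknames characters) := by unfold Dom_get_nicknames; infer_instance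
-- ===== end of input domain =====

-- B maintains a sorted duplicate-free list by online ordered insertion instead of A's set accumulation + final sort (alternative algorithm).

-- ===== PORT A =====
-- shared per-element transform (the identical expression occurs verbatim in both Pythons):
-- ''.join(str(ord(char)) if not char.isalnum() else char for char in character.lower().capitalize())
-- str.capitalize() ported by hand: first char uppercased, rest lowercased (exact on the ASCII domain).
def pvCapitalize (cs : List Char) : List Char :=
  match cs with
  | [] => []
  | c :: rest => PySem.Chars.upperChar c :: PySem.Chars.lower rest

def pvTransform (s : String) : String :=
  String.ofList ((pvCapitalize (PySem.Chars.lower s.toList)).flatMap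
      (fun c => if PySem.Chars.isalnum c then [c] else PySem.Int.toChars (c.toNat : Int)))

def get_nicknames (characters : List String) : List String :=
  let nicknames := characters.foldl (fun s ch => PySem.Set.add s (pvTransform ch)) PySem.Set.empty
  PySem.List.sorted nicknames (fun x => x) false

-- ===== PORT B =====
-- the 'while i < len(result) and result[i] < nickname: i += 1' scan followed by
-- 'if i == len(result) or result[i] != nickname: result.insert(i, nickname)',
-- written as the obvious structural recursion over the sorted list
def pvInsert : List String → String → List String
  | [], x => [x]
  | h :: t, x => if h < x then h :: pvInsert t x else if h ≠ x then x :: h :: t else h :: t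

def get_nicknames_alt (characters : List String) : List String :=
  characters.foldl (fun acc ch => pvInsert acc (pvTransform ch)) []

-- ===== PRECONDITION & SPEC =====
def Spec_get_nicknames (characters : List String) (out : List String) : Prop := out = get_nicknames_alt characters
instance (characters : List String) (out : List String) : Decidable (Spec_get_nicknames characters out) := by unfold Spec_get_nicknames; infer_instance

-- ===== CLAIM (what is proved, stated in full; the proofs are below) =====
def Claim_equal_get_nicknames : Prop := ∀ (characters : List String), Dom_get_nicknames characters → Spec_get_nicknames characters (get_nicknames characters)

-- ===== LEMMAS AND PROOFS =====

theorem mem_pvInsert (y x : String) : ∀ (acc : List String), y ∈ pvInsert acc x ↔ y ∈ acc ∨ y = x := by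
  intro acc
  induction acc with
  | nil => simp [pvInsert]
  | cons h t ih =>
    simp only [pvInsert]
    by_cases h1 : h < x
    · simp [h1, ih]; tauto
    · by_cases h2 : h ≠ x
      · simp [h1, h2]; tauto
      · rw [not_not] at h2
        subst h2
        simp; tauto

theorem pvInsert_pairwise (x : String) : ∀ (acc : List String),
    acc.Pairwise (· < ·) → (pvInsert acc x).Pairwise (· < ·) := by
  intro acc
  induction acc with
  | nil => intro _; simp [pvInsert]
  | cons h t ih =>
    intro hp
    have hht : ∀ y ∈ t, h < y := (List.pairwise_cons.mp hp).1
    have htp : t.Pairwise (· < ·) := (List.pairwise_cons.mp hp).2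
    simp only [pvInsert]
    by_cases h1 : h < x
    · simp only [if_pos h1]
      refine List.pairwise_cons.mpr ⟨?_, ih htp⟩
      intro y hy
      rcases (mem_pvInsert y x t).mp hy with hy' | rfl
      · exact hht y hy'
      · exact h1
    · by_cases h2 : h ≠ x
      · have hx : x < h := lt_of_le_of_ne (not_lt.mp h1) (Ne.symm h2)
        simp only [if_neg h1, if_pos h2]
        refine List.pairwise_cons.mpr ⟨?_, hp⟩
        intro y hy
        rcases List.mem_cons.mp hy with rfl | hy'
        · exact hx
        · exact lt_trans hx (hht y hy')
      · simp only [if_neg h1, if_neg h2]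
        exact hp

theorem pv_fold_invariant : ∀ (T : List String) (acc : List String),
    acc.Pairwise (· < ·) →
    (T.foldl pvInsert acc).Pairwise (· < ·) ∧
    (∀ y, y ∈ T.foldl pvInsert acc ↔ y ∈ acc ∨ y ∈ T) := by
  intro T
  induction T with
  | nil => intro acc h; simpa using h
  | cons x xs ih =>
    intro acc h
    have h' := ih (pvInsert acc x) (pvInsert_pairwise x acc h)
    refine ⟨h'.1, ?_⟩
    intro y
    rw [List.foldl_cons, h'.2 y, mem_pvInsert, List.mem_cons]
    constructor
    · rintro (((h|rfl))|h) <;> simp [h]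
    · rintro (h | (rfl | h)) <;> simp [h]

-- ===== VERDICT (by name: the statement is the Claim_ definition above) =====
theorem get_nicknames_spec : Claim_equal_get_nicknames := by
  intro characters _
  unfold Spec_get_nicknames get_nicknames get_nicknames_alt
  set T := characters.map pvTransform with hT
  have hA : characters.foldl (fun s ch => PySem.Set.add s (pvTransform ch)) PySem.Set.empty
      = PySem.Set.ofList T := by
    rw [hT, PySem.Set.ofList_eq_foldl, List.foldl_map]; rfl
  have hB : characters.foldl (fun acc ch => pvInsert acc (pvTransform ch)) []
      = T.foldl pvInsert [] := by
    rw [hT, List.foldl_map]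
  rw [hA, hB]
  have hinv := pv_fold_invariant T [] (by simp)
  have hnd : (T.foldl pvInsert []).Nodup := hinv.1.imp (fun h => ne_of_lt h)
  have hmem : ∀ y, y ∈ PySem.Set.ofList T ↔ y ∈ T.foldl pvInsert [] := by
    intro y
    rw [PySem.Set.mem_ofList, hinv.2 y]
    simp
  have hpm : (T.foldl pvInsert []).Perm (PySem.Set.ofList T) :=
    (List.perm_ext_iff_of_nodup hnd (PySem.Set.nodup_ofList T)).mpr (fun y => (hmem y).symm)
  exact PySem.List.sorted_eq_of_perm_of_pairwise_lt (key := fun x => x)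
    (xs := PySem.Set.ofList T) (ys := T.foldl pvInsert []) hpm hinv.1
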